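-- pv_equiv track=rewrite | github.com/JAMM0118/Proyecto-Uno-ADA-II | algoritmos/problema_2_Subasta_Publica/subastaBruta.py | resolver_subasta
-- ===== SOURCE A (Python) =====
-- def resolver_subasta(numeroAcciones, precioAcciones, ofertantes):
--     def generar_combinaciones(numeroAcciones, ofertantes):
--         resultados = []
--
--         def backtrack(asignacion_actual, indice, acciones_restantes):
--             if indice == len(ofertantes):
--                 if acciones_restantes >= 0:
--                     resultados.append(asignacion_actual[:])
--                 return
--
--             _, min_acciones, max_acciones = ofertantes[indice]
--
--             for x in range(min_acciones, max_acciones + 1):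
--                 if acciones_restantes - x >= 0:
--                     asignacion_actual[indice] = x
--                     backtrack(asignacion_actual, indice + 1, acciones_restantes - x)
--
--             asignacion_actual[indice] = 0
--             backtrack(asignacion_actual, indice + 1, acciones_restantes)
--
--         asignacion_inicial = [0] * len(ofertantes)
--         backtrack(asignacion_inicial, 0, numeroAcciones)
--
--         return resultados
--
--     combinaciones = generar_combinaciones(numeroAcciones, ofertantes)
--     mejor_valor = 0
--     mejor_combinacion = None
--     acciones_gobierno = 0
--
--     for combinacion in combinaciones:
--         valor = 0
--         acciones_asignadas = sum(combinacion)
--         for i, (precio, _, _) in enumerate(ofertantes):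
--             valor += combinacion[i] * precio
--         if acciones_asignadas < numeroAcciones:
--             valor += (numeroAcciones - acciones_asignadas) * precioAcciones
--
--         if valor > mejor_valor:
--             mejor_valor = valor
--             mejor_combinacion = combinacion
--             acciones_gobierno = numeroAcciones - acciones_asignadas
--
--     return mejor_combinacion, mejor_valor, acciones_gobierno, combinaciones
-- ===== SOURCE B (Python) =====
-- def resolver_subasta(numeroAcciones, precioAcciones, ofertantes):
--     # iterative layered enumeration instead of a recursive backtracker
--     estados = [([], numeroAcciones)]
--     for _, min_acciones, max_acciones in ofertantes:
--         estados = [(asig + [x], resto - x)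
--                    for asig, resto in estados
--                    for x in [v for v in range(min_acciones, max_acciones + 1)
--                              if resto - v >= 0] + [0]]
--     combinaciones = [asig for asig, resto in estados if resto >= 0]
--
--     def valor(c):
--         v = sum(x * precio for x, (precio, _, _) in zip(c, ofertantes))
--         s = sum(c)
--         return v + (numeroAcciones - s) * precioAcciones if s < numeroAcciones else v
--
--     mejor_valor = max((valor(c) for c in combinaciones), default=0)
--     if mejor_valor > 0:
--         for c in combinaciones:
--             if valor(c) == mejor_valor:
--                 return c, mejor_valor, numeroAcciones - sum(c), combinaciones
--     return None, 0, 0, combinaciones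
-- ===== Notes on version B (the rewrite author's own statement) =====
-- stated objective: idiomatic
-- what changed: Replaces the index-mutating recursive backtracker with an iterative layer-by-layer comprehension building (assignment, remaining) states, and replaces the running-best selection loop with max(..., default=0) plus a first-match scan.
import Mathlib
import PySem

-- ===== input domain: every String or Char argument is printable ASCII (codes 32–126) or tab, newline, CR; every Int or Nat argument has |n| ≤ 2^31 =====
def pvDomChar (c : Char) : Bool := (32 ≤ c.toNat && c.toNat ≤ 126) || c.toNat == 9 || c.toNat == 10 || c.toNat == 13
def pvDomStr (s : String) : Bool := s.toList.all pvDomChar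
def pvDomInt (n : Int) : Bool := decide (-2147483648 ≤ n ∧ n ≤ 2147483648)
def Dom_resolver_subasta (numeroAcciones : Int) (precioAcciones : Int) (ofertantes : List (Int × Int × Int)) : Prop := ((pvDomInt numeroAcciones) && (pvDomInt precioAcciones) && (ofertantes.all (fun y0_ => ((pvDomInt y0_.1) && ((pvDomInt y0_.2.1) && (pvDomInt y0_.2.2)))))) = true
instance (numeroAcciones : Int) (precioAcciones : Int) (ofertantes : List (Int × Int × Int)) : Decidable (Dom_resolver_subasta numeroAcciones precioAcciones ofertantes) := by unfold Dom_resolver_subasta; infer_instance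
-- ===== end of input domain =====

-- B replaces A's index-mutating recursive backtracker by an iterative layer-by-layer enumeration and
-- the running-best loop by max(default=0) plus a first-match scan; same results, similar cost (objective: idiomatic).

-- ===== PORT A =====
-- A's backtrack(asignacion_actual, indice, acciones_restantes): 'pending' is the suffix ofertantes[indice:]
-- (so 'indice == len(ofertantes)' is 'pending = []' and 'ofertantes[indice]' is pending's head); the mutated
-- shared list asignacion_actual is threaded through and returned alongside resultados.
def pvBt : List (Int × Int × Int) → List Int → Nat → Int → List (List Int) → List Int × List (List Int)
  | [], asig, _, rest, res => (asig, if rest ≥ 0 then res ++ [asig] else res)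
  | (_, mn, mx) :: tl, asig, indice, rest, res =>
      let st := (PySem.List.pyRange mn (mx + 1) 1).foldl
        (fun st x =>
          if rest - x ≥ 0 then pvBt tl (st.1.set indice x) (indice + 1) (rest - x) st.2
          else st)
        (asig, res)
      pvBt tl (st.1.set indice 0) (indice + 1) rest st.2

-- body of A's selection loop ('for combinacion in combinaciones: …'); combinacion[i] is always in range
-- (every combinacion has length len(ofertantes)), so pyGetD's default 0 is never used
def pvSelStep (numeroAcciones precioAcciones : Int) (ofertantes : List (Int × Int × Int))
    (st : Int × Option (List Int) × Int) (combinacion : List Int) : Int × Option (List Int) × Int :=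
  let acciones_asignadas := combinacion.sum
  let valor := (PySem.List.enumerate ofertantes).foldl
    (fun v ip => v + PySem.List.pyGetD combinacion ip.1 0 * ip.2.1) 0
  let valor := if acciones_asignadas < numeroAcciones then
      valor + (numeroAcciones - acciones_asignadas) * precioAcciones else valor
  if valor > st.1 then (valor, some combinacion, numeroAcciones - acciones_asignadas) else st

def resolver_subasta (numeroAcciones : Int) (precioAcciones : Int) (ofertantes : List (Int × Int × Int)) : Option (List Int) × Int × Int × List (List Int) :=
  let combinaciones := (pvBt ofertantes (List.replicate ofertantes.length 0) 0 numeroAcciones []).2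
  let fin := combinaciones.foldl (pvSelStep numeroAcciones precioAcciones ofertantes) (0, none, 0)
  (fin.2.1, fin.1, fin.2.2, combinaciones)

-- ===== PORT B =====
-- the per-ofertante value list: [v for v in range(mn, mx+1) if resto - v >= 0] + [0]
def pvVals (mn mx resto : Int) : List Int :=
  ((PySem.List.pyRange mn (mx + 1) 1).filter (fun v => decide (resto - v ≥ 0))) ++ [0]

-- one layer of B's comprehension over estados
def pvStepB (estados : List (List Int × Int)) (o : Int × Int × Int) : List (List Int × Int) :=
  estados.flatMap (fun ar => (pvVals o.2.1 o.2.2 ar.2).map (fun x => (ar.1 ++ [x], ar.2 - x)))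

-- B's local 'valor(c)'
def pvValorB (numeroAcciones precioAcciones : Int) (ofertantes : List (Int × Int × Int)) (c : List Int) : Int :=
  let v := ((c.zip ofertantes).map (fun xp => xp.1 * xp.2.1)).sum
  let s := c.sum
  if s < numeroAcciones then v + (numeroAcciones - s) * precioAcciones else v

def resolver_subasta_alt (numeroAcciones : Int) (precioAcciones : Int) (ofertantes : List (Int × Int × Int)) : Option (List Int) × Int × Int × List (List Int) :=
  let estados := ofertantes.foldl pvStepB [(([] : List Int), numeroAcciones)]
  let combinaciones := estados.filterMap (fun ar => if ar.2 ≥ 0 then some ar.1 else none)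
  let mejor_valor := PySem.List.maxD (combinaciones.map (pvValorB numeroAcciones precioAcciones ofertantes)) (fun v => v) 0
  if mejor_valor > 0 then
    match combinaciones.find? (fun c => pvValorB numeroAcciones precioAcciones ofertantes c == mejor_valor) with
    | some c => (some c, mejor_valor, numeroAcciones - c.sum, combinaciones)
    | none => (none, 0, 0, combinaciones)
  else (none, 0, 0, combinaciones)

-- ===== PRECONDITION & SPEC =====
def Spec_resolver_subasta (numeroAcciones : Int) (precioAcciones : Int) (ofertantes : List (Int × Int × Int)) (out : Option (List Int) × Int × Int × List (List Int)) : Prop := out = resolver_subasta_alt numeroAcciones precioAcciones ofertantes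
instance (numeroAcciones : Int) (precioAcciones : Int) (ofertantes : List (Int × Int × Int)) (out : Option (List Int) × Int × Int × List (List Int)) : Decidable (Spec_resolver_subasta numeroAcciones precioAcciones ofertantes out) := by unfold Spec_resolver_subasta; infer_instance

-- ===== CLAIM (what is proved, stated in full; the proofs are below) =====
def Claim_equal_resolver_subasta : Prop := ∀ (numeroAcciones : Int) (precioAcciones : Int) (ofertantes : List (Int × Int × Int)), Dom_resolver_subasta numeroAcciones precioAcciones ofertantes → Spec_resolver_subasta numeroAcciones precioAcciones ofertantes (resolver_subasta numeroAcciones precioAcciones ofertantes)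

-- ===== LEMMAS AND PROOFS =====

-- the common enumeration spec: all (partial assignment, remaining) pairs in DFS order
def pvPenum : List (Int × Int × Int) → Int → List (List Int × Int)
  | [], r => [([], r)]
  | (_, mn, mx) :: tl, r =>
      (pvVals mn mx r).flatMap (fun x => (pvPenum tl (r - x)).map (fun pr => (x :: pr.1, pr.2)))

def pvCombos (os : List (Int × Int × Int)) (r : Int) : List (List Int) :=
  (pvPenum os r).filterMap (fun pr => if pr.2 ≥ 0 then some pr.1 else none)

lemma pvPenum_len (os : List (Int × Int × Int)) : ∀ (r : Int) (pr : List Int × Int),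
    pr ∈ pvPenum os r → pr.1.length = os.length := by
  induction os with
  | nil => intro r pr h; simp [pvPenum] at h; simp [h]
  | cons o tl ih =>
    obtain ⟨a, mn, mx⟩ := o
    intro r pr h
    simp only [pvPenum, List.mem_flatMap, List.mem_map] at h
    obtain ⟨x, hx, q, hq, rfl⟩ := h
    simpa using ih (r - x) q hq


lemma pvCombos_len (os : List (Int × Int × Int)) (r : Int) (c : List Int)
    (hc : c ∈ pvCombos os r) : c.length = os.length := by
  simp only [pvCombos, List.mem_filterMap] at hc
  obtain ⟨pr, hpr, hsome⟩ := hc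
  have h1 : pr.1 = c := by by_cases h : pr.2 ≥ 0 <;> simp [h] at hsome; exact hsome
  exact h1 ▸ pvPenum_len os r pr hpr

lemma pv_take_set (l : List Int) (i : Nat) (x : Int) : (l.set i x).take i = l.take i := by
  rw [List.take_set]; exact List.set_eq_of_length_le (by simp)

lemma pv_take_succ_set (l : List Int) (i : Nat) (x : Int) (h : i < l.length) :
    (l.set i x).take (i + 1) = l.take i ++ [x] := by
  rw [List.take_add_one, List.take_set, List.set_eq_of_length_le (by simp),
    List.getElem?_set_self (by simpa using h)]
  rfl

lemma pvBt_spec (pending : List (Int × Int × Int)) :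
    ∀ (asig : List Int) (indice : Nat) (rest : Int) (res : List (List Int)),
    asig.length = indice + pending.length →
    (pvBt pending asig indice rest res).2
      = res ++ (pvPenum pending rest).filterMap
          (fun pr => if pr.2 ≥ 0 then some (asig.take indice ++ pr.1) else none)
    ∧ (pvBt pending asig indice rest res).1.take indice = asig.take indice
    ∧ (pvBt pending asig indice rest res).1.length = asig.length := by
  induction pending with
  | nil =>
    intro asig indice rest res h
    simp only [pvBt, pvPenum, List.filterMap_cons, List.filterMap_nil]
    constructor
    · have ht : asig.take indice = asig := List.take_of_length_le (by simp at h; omega)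
      split_ifs with hr <;> simp [ht]
    · simp
  | cons o tl ih =>
    obtain ⟨a, mn, mx⟩ := o
    intro asig indice rest res h
    have hlen : indice < asig.length := by simp at h; omega
    -- the loop over range(mn, mx+1)
    have inner : ∀ (l : List Int) (st : List Int × List (List Int)),
        st.1.length = asig.length →
        (l.foldl (fun st x =>
            if rest - x ≥ 0 then pvBt tl (st.1.set indice x) (indice + 1) (rest - x) st.2
            else st) st).1.take indice = st.1.take indice
        ∧ (l.foldl (fun st x =>
            if rest - x ≥ 0 then pvBt tl (st.1.set indice x) (indice + 1) (rest - x) st.2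
            else st) st).1.length = asig.length
        ∧ (l.foldl (fun st x =>
            if rest - x ≥ 0 then pvBt tl (st.1.set indice x) (indice + 1) (rest - x) st.2
            else st) st).2
          = st.2 ++ (l.filter (fun x => decide (rest - x ≥ 0))).flatMap
              (fun x => (pvPenum tl (rest - x)).filterMap
                (fun pr => if pr.2 ≥ 0 then some (st.1.take indice ++ x :: pr.1) else none)) := by
      intro l
      induction l with
      | nil => intro st hst; exact ⟨rfl, hst, by simp⟩
      | cons x xs ihl =>
        intro st hst
        rw [List.foldl_cons]
        by_cases hx : rest - x ≥ 0
        · simp only [if_pos hx]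
          have hset : (st.1.set indice x).length = indice + 1 + tl.length := by
            simp [hst]; simp at h; omega
          obtain ⟨h2, htake, hlen2⟩ := ih (st.1.set indice x) (indice + 1) (rest - x) st.2 hset
          set st' := pvBt tl (st.1.set indice x) (indice + 1) (rest - x) st.2 with hst'
          obtain ⟨ht', hl', h2'⟩ := ihl st' (by rw [hlen2]; simp [hst])
          have hlen' : indice < st.1.length := by omega
          have htk : st'.1.take indice = st.1.take indice := by
            have := pv_take_set st.1 indice x
            calc st'.1.take indice = (st'.1.take (indice+1)).take indice := by
                  simp [List.take_take]
              _ = ((st.1.set indice x).take (indice+1)).take indice := by rw [htake]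
              _ = st.1.take indice := by
                  rw [pv_take_succ_set st.1 indice x hlen', List.take_append_of_le_length (by simp [List.length_take]; omega)]
                  simp [List.take_take]
          refine ⟨by rw [ht', htk], hl', ?_⟩
          rw [h2', h2]
          rw [List.filter_cons_of_pos (by simpa using hx), List.flatMap_cons]
          rw [pv_take_succ_set st.1 indice x hlen']
          simp only [htk, List.append_assoc]
          simp only [List.singleton_append]
        · simp only [if_neg hx]
          obtain ⟨ht', hl', h2'⟩ := ihl st hst
          refine ⟨ht', hl', ?_⟩
          rw [h2', List.filter_cons_of_neg (by simpa using hx)]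
    -- assemble the node case
    obtain ⟨htO, hlO, h2O⟩ := inner (PySem.List.pyRange mn (mx + 1) 1) (asig, res) rfl
    simp only [pvBt]
    set stL := (PySem.List.pyRange mn (mx + 1) 1).foldl
        (fun st x =>
          if rest - x ≥ 0 then pvBt tl (st.1.set indice x) (indice + 1) (rest - x) st.2
          else st) (asig, res) with hstL
    have hlenL : indice < stL.1.length := by omega
    have hsetL : (stL.1.set indice 0).length = indice + 1 + tl.length := by
      simp [hlO]; simp at h; omega
    obtain ⟨h2F, htakeF, hlenF⟩ := ih (stL.1.set indice 0) (indice + 1) rest stL.2 hsetL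
    set stF := pvBt tl (stL.1.set indice 0) (indice + 1) rest stL.2 with hstF
    have htkF : stF.1.take indice = asig.take indice := by
      calc stF.1.take indice = (stF.1.take (indice+1)).take indice := by simp [List.take_take]
        _ = ((stL.1.set indice 0).take (indice+1)).take indice := by rw [htakeF]
        _ = stL.1.take indice := by
            rw [pv_take_succ_set stL.1 indice 0 hlenL,
              List.take_append_of_le_length (by simp [List.length_take]; omega)]
            simp [List.take_take]
        _ = asig.take indice := htO
    refine ⟨?_, htkF, by rw [hlenF]; simp [hlO]⟩
    rw [h2F, h2O, pv_take_succ_set stL.1 indice 0 hlenL, htO]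
    simp only [pvPenum, pvVals, List.flatMap_append, List.filterMap_append, List.append_assoc,
      List.filterMap_flatMap, List.filterMap_map, List.flatMap_cons, List.flatMap_nil,
      List.append_nil, sub_zero, Function.comp, List.singleton_append]

lemma pvFoldB (os : List (Int × Int × Int)) : ∀ (states : List (List Int × Int)),
    os.foldl pvStepB states
      = states.flatMap (fun ar => (pvPenum os ar.2).map (fun pr => (ar.1 ++ pr.1, pr.2))) := by
  induction os with
  | nil => intro states; simp [pvPenum]
  | cons o tl ih =>
    intro states
    rw [List.foldl_cons, ih]
    simp only [pvStepB, pvPenum, List.flatMap_assoc]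
    congr 1; funext ar
    simp only [List.flatMap_map, List.map_flatMap, List.map_map]
    congr 1; funext x
    congr 1; funext pr
    simp

lemma pvValorA_eq (os : List (Int × Int × Int)) : ∀ (full : List Int) (k : Nat) (acc : Int),
    k + os.length ≤ full.length →
    (PySem.List.enumerate os (k : Int)).foldl
        (fun v ip => v + PySem.List.pyGetD full ip.1 0 * ip.2.1) acc
      = acc + (((full.drop k).zip os).map (fun xp => xp.1 * xp.2.1)).sum := by
  induction os with
  | nil => intro full k acc h; simp [PySem.List.enumerate]
  | cons o tl ih =>
    intro full k acc h
    have hk : k < full.length := by simp at h; omega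
    rw [PySem.List.enumerate_cons, List.foldl_cons]
    have : ((k : Int) + 1) = ((k + 1 : Nat) : Int) := by push_cast; ring
    rw [this, ih full (k + 1) _ (by simp at h ⊢; omega)]
    rw [List.drop_eq_getElem_cons hk, List.zip_cons_cons, List.map_cons, List.sum_cons]
    rw [PySem.List.pyGetD_natCast, List.getD_eq_getElem?_getD, List.getElem?_eq_getElem hk]
    simp; ring

lemma pvSelStep_eq (N P : Int) (os : List (Int × Int × Int)) (st : Int × Option (List Int) × Int)
    (c : List Int) (hc : c.length = os.length) :
    pvSelStep N P os st c
      = if pvValorB N P os c > st.1 then (pvValorB N P os c, some c, N - c.sum) else st := by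
  have h := pvValorA_eq os c 0 0 (by omega)
  simp only [Nat.cast_zero, List.drop_zero, zero_add] at h
  simp only [pvSelStep, pvValorB, h]

lemma pvSel_fold (N P : Int) (os : List (Int × Int × Int)) :
    ∀ (combos : List (List Int)) (mv : Int) (mc : Option (List Int)) (ag : Int),
    combos.foldl (fun st c => if pvValorB N P os c > st.1 then (pvValorB N P os c, some c, N - c.sum) else st) (mv, mc, ag)
      = (if (combos.map (pvValorB N P os)).foldl max mv > mv then
          match combos.find? (fun c => pvValorB N P os c == (combos.map (pvValorB N P os)).foldl max mv) with
          | some c => ((combos.map (pvValorB N P os)).foldl max mv, some c, N - c.sum)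
          | none => (mv, mc, ag)
         else (mv, mc, ag)) := by
  intro combos
  induction combos with
  | nil => intro mv mc ag; simp
  | cons c t ih =>
    intro mv mc ag
    simp only [List.foldl_cons, List.map_cons]
    by_cases hvc : pvValorB N P os c > mv
    · rw [if_pos hvc, ih, max_eq_right hvc.le]
      set M := (t.map (pvValorB N P os)).foldl max (pvValorB N P os c) with hM
      have hMv : pvValorB N P os c ≤ M := (PySem.List.le_foldl_max (t.map (pvValorB N P os)) _).1
      by_cases hMgt : M > pvValorB N P os c
      · rw [if_pos hMgt, if_pos (lt_trans hvc hMgt),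
          List.find?_cons_of_neg (by simp; omega)]
        rcases hfind : t.find? (fun c => pvValorB N P os c == M) with _ | c'
        · exfalso
          rcases (PySem.List.foldl_max_mem (t.map (pvValorB N P os)) (pvValorB N P os c)) with h | h
          · omega
          · obtain ⟨c', hc', hval⟩ := List.mem_map.mp h
            have := List.find?_eq_none.mp hfind c' hc'
            simp [hval, ← hM] at this
        · rfl
      · have hMeq : M = pvValorB N P os c := le_antisymm (not_lt.mp hMgt) hMv
        rw [if_neg hMgt, if_pos (by omega),
          List.find?_cons_of_pos (by simp [hMeq]), hMeq]
    · rw [if_neg hvc, ih, max_eq_left (not_lt.mp hvc)]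
      set M := (t.map (pvValorB N P os)).foldl max mv with hM
      by_cases hMgt : M > mv
      · rw [if_pos hMgt, if_pos hMgt, List.find?_cons_of_neg (by simp; omega)]
      · rw [if_neg hMgt, if_neg hMgt]

-- ===== VERDICT (by name: the statement is the Claim_ definition above) =====
theorem resolver_subasta_spec : Claim_equal_resolver_subasta := by
  intro N P os _
  unfold Spec_resolver_subasta resolver_subasta resolver_subasta_alt
  have hA : (pvBt os (List.replicate os.length 0) 0 N []).2 = pvCombos os N := by
    have := (pvBt_spec os (List.replicate os.length 0) 0 N [] (by simp)).1
    simpa [pvCombos] using this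
  have hB : (os.foldl pvStepB [(([] : List Int), N)]).filterMap
      (fun ar => if ar.2 ≥ 0 then some ar.1 else none) = pvCombos os N := by
    rw [pvFoldB]
    simp [pvCombos]
  dsimp only
  rw [hA, hB]
  rw [PySem.List.foldl_congr_mem (pvCombos os N) (pvSelStep N P os)
    (fun st c => if pvValorB N P os c > st.1 then (pvValorB N P os c, some c, N - c.sum) else st)
    (0, none, 0) (fun st c hc => pvSelStep_eq N P os st c (pvCombos_len os N c hc))]
  rw [pvSel_fold N P os (pvCombos os N) 0 none 0]
  rcases hcombos : pvCombos os N with _ | ⟨c, t⟩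
  · simp [PySem.List.maxD, PySem.List.max?]
  · simp only [List.map_cons, List.foldl_cons]
    rw [PySem.List.maxD, PySem.List.max?_id_cons]
    set Mb := (t.map (pvValorB N P os)).foldl max (pvValorB N P os c) with hMb
    have h0 : (t.map (pvValorB N P os)).foldl max (max 0 (pvValorB N P os c)) = max 0 Mb := by
      rw [hMb]; exact List.foldl_assoc
    rw [h0]
    simp only [Option.getD_some]
    by_cases hpos : Mb > 0
    · have hmax : max 0 Mb = Mb := max_eq_right hpos.le
      rw [hmax, if_pos hpos, if_pos hpos]
      rcases hfind : (c :: t).find? (fun c' => pvValorB N P os c' == Mb) with _ | c' <;> rfl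
    · have hmax : max 0 Mb = 0 := max_eq_left (by omega)
      rw [hmax, if_neg (by omega), if_neg hpos]
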